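-- pv_equiv track=rewrite | github.com/snsunx/fd-greens | archive/archive_src/tools.py | get_number_state_indices
-- ===== SOURCE A (Python) =====
-- from itertools import combinations
--
-- def get_number_state_indices(n_orb, n_elec, anc=''):
--     inds = []
--     for tup in combinations(range(n_orb), n_elec):
--         bin_list = ['1' if (n_orb - 1 - i) in tup else '0' for i in range(n_orb)]
--         bin_str = anc + ''.join(bin_list)
--         inds.append(int(bin_str, 2))
--     inds.sort()
--     return inds
-- ===== SOURCE B (Python) =====
-- def _states(n, k):
--     """Numbers < 2**n with exactly k bits set, in increasing order."""
--     if k == 0: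
--         return [0]
--     if k < 0 or k > n:
--         return []
--     top = 1 << (n - 1)
--     return _states(n - 1, k) + [top + x for x in _states(n - 1, k - 1)]
--
--
-- def get_number_state_indices(n_orb, n_elec, anc=''):
--     bits = _states(max(n_orb, 0), n_elec)
--     if not bits:
--         return []
--     offset = 0 if anc == '' else int(anc, 2) << max(n_orb, 0)
--     return [offset + x for x in bits]
-- ===== Notes on version B (the rewrite author's own statement) =====
-- stated objective: alternative
-- what changed: Replaces enumerate-combinations / build-binary-string / int-parse / final-sort by a direct divide-and-conquer generation of the fixed-popcount integers (numbers with k of the low n bits set = those of n-1 bits, then those plus the top bit), which is already in increasing order so no string building and no sort is needed; the ancilla offset is computed once as int(anc,2) << n_orb.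
-- outside the precondition, e.g. on get_number_state_indices(2, 1, '-1'): A returns [-6, -5], B returns [-3, -2]; on get_number_state_indices(2, 1, '1_'): A returns [5, 6], B raises ValueError
import Mathlib
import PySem

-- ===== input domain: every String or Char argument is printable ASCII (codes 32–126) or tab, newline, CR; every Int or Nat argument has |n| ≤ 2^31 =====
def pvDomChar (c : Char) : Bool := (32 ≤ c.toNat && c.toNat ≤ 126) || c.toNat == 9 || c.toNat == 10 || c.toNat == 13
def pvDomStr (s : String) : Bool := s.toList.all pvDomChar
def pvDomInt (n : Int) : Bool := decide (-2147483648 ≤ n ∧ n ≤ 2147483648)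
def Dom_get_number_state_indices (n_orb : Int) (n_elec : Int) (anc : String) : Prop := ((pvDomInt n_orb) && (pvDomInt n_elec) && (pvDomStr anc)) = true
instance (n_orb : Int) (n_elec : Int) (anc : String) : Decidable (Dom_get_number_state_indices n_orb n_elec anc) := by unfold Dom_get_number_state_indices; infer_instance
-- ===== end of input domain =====

-- B replaces A's enumerate-combinations / binary-string building / int() parse / final sort by a
-- direct recursive generation of the fixed-popcount integers, already in increasing order (objective: alternative).

-- ===== PORT A =====

-- int(s, 2): exact on nonempty strings of '0'/'1' characters only; Pre_ restricts anc (and the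
-- generated bit characters are always '0'/'1') so every string A parses inside Pre_ has this shape.
def pvParse2 (cs : List Char) : Int :=
  cs.foldl (fun acc c => 2 * acc + (if c = '1' then 1 else 0)) 0

-- itertools.combinations(l, k) over a list, in itertools' order
def pyCombinations : Nat → List Int → List (List Int)
  | 0, _ => [[]]
  | _ + 1, [] => []
  | k + 1, x :: xs =>
    -- itertools.combinations yields nothing when r exceeds the pool size; this short-circuit
    -- only prunes those empty branches (pyCombinations_cons below proves the value is unchanged)
    if xs.length < k then []
    else (pyCombinations k xs).map (fun t => x :: t) ++ pyCombinations (k + 1) xs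

def get_number_state_indices (n_orb : Int) (n_elec : Int) (anc : String) : List Int :=
  let inds := (pyCombinations n_elec.toNat (PySem.List.pyRange 0 n_orb 1)).map (fun tup =>
    let bin_list := (PySem.List.pyRange 0 n_orb 1).map (fun i => if (n_orb - 1 - i) ∈ tup then '1' else '0')
    pvParse2 (anc.toList ++ bin_list))
  PySem.List.sorted inds (fun x => x) false

-- ===== PORT B =====

-- _states(n, k): numbers < 2^n with exactly k bits set, increasing.
-- (for n = 0 and k ≠ 0 Python's `k < 0 or k > n` guard always fires, giving [])
def altStates : Nat → Int → List Int
  | 0, k => if k = 0 then [0] else []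
  | m + 1, k =>
      if k = 0 then [0]
      else if k < 0 ∨ (m + 1 : Int) < k then []
      else altStates m k ++ (altStates m (k - 1)).map (fun x => 2 ^ m + x)

def get_number_state_indices_alt (n_orb : Int) (n_elec : Int) (anc : String) : List Int :=
  let bits := altStates (max n_orb 0).toNat n_elec
  if bits = [] then []
  else
    -- int(anc, 2) << max(n_orb, 0)
    let offset : Int := if anc = "" then 0 else pvParse2 anc.toList * 2 ^ (max n_orb 0).toNat
    bits.map (fun x => offset + x)

-- ===== PRECONDITION & SPEC =====
-- Pre_ excludes exactly: negative n_elec (combinations raises ValueError); and, whenever basis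
-- states exist (n_elec ≤ max(n_orb,0)), ancillae that are not pure '0'/'1' strings or the empty
-- ancilla with n_orb ≤ 0 — there A either raises ValueError in int() or returns a value produced by
-- Python's lenient int parsing (signs/whitespace/underscores), an artefact of the string encoding.
def Pre_get_number_state_indices (n_orb : Int) (n_elec : Int) (anc : String) : Prop :=
  0 ≤ n_elec ∧
    (n_elec ≤ max n_orb 0 →
      (anc.toList.all (fun c => c == '0' || c == '1') = true ∧ (anc = "" → 0 < n_orb)))
instance (n_orb : Int) (n_elec : Int) (anc : String) : Decidable (Pre_get_number_state_indices n_orb n_elec anc) := by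
  unfold Pre_get_number_state_indices; infer_instance

def pvWitness_get_number_state_indices : Int × Int × String := (2, 1, "1")

def Spec_get_number_state_indices (n_orb : Int) (n_elec : Int) (anc : String) (out : List Int) : Prop := out = get_number_state_indices_alt n_orb n_elec anc
instance (n_orb : Int) (n_elec : Int) (anc : String) (out : List Int) : Decidable (Spec_get_number_state_indices n_orb n_elec anc out) := by unfold Spec_get_number_state_indices; infer_instance

-- ===== CLAIM (what is proved, stated in full; the proofs are below) =====
def Claim_equal_get_number_state_indices : Prop := ∀ (n_orb : Int) (n_elec : Int) (anc : String), Dom_get_number_state_indices n_orb n_elec anc → Pre_get_number_state_indices n_orb n_elec anc → Spec_get_number_state_indices n_orb n_elec anc (get_number_state_indices n_orb n_elec anc)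

-- ===== LEMMAS AND PROOFS =====

def pvL (n : Nat) : List Int := (List.range n).map Int.ofNat

def pvMsum (t : List Int) : Int := (t.map (fun j => (2 : Int) ^ j.toNat)).sum

def pvAdd (c v : Int) : Int := c + v

theorem pvParse2_foldl (b : List Char) : ∀ (init : Int),
    b.foldl (fun acc c => 2 * acc + (if c = '1' then 1 else 0)) init
      = init * 2 ^ b.length + pvParse2 b := by
  induction b with
  | nil => intro init; simp [pvParse2]
  | cons c b ih =>
    intro init
    simp only [List.foldl_cons, List.length_cons, pvParse2] at *
    rw [ih, ih ((2 : Int) * 0 + _)]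
    ring

theorem pvParse2_append (a b : List Char) :
    pvParse2 (a ++ b) = pvParse2 a * 2 ^ b.length + pvParse2 b := by
  unfold pvParse2
  rw [List.foldl_append, pvParse2_foldl]
  rfl

theorem pyCombinations_nil {k : Nat} {l : List Int} (h : l.length < k) :
    pyCombinations k l = [] := by
  induction l generalizing k with
  | nil => cases k with
    | zero => omega
    | succ k => rfl
  | cons x xs ih =>
    cases k with
    | zero => simp at h
    | succ k =>
      simp only [pyCombinations]
      split
      · rfl
      · rw [ih (by simp at h ⊢; omega), ih (by simp at h ⊢; omega)]
        simp

theorem pyCombinations_cons (k : Nat) (x : Int) (xs : List Int) :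
    pyCombinations (k + 1) (x :: xs)
      = (pyCombinations k xs).map (fun t => x :: t) ++ pyCombinations (k + 1) xs := by
  rw [pyCombinations]
  split
  · rw [pyCombinations_nil (by omega), pyCombinations_nil (by simp; omega)]
    simp
  · rfl

theorem pyCombinations_sublist {k : Nat} {l t : List Int} (h : t ∈ pyCombinations k l) :
    t.Sublist l := by
  induction l generalizing k t with
  | nil =>
    cases k with
    | zero => simp [pyCombinations] at h; simp [h]
    | succ k => simp [pyCombinations] at h
  | cons x xs ih =>
    cases k with
    | zero => simp [pyCombinations] at h; simp [h]
    | succ k =>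
      rw [pyCombinations_cons] at h
      simp only [List.mem_append, List.mem_map] at h
      rcases h with ⟨t', ht', rfl⟩ | h
      · exact (ih ht').cons₂ x
      · exact (ih h).cons x

theorem pvParse2_range (g : Nat → Prop) [DecidablePred g] (n : Nat) :
    pvParse2 ((List.range n).map (fun i => if g i then '1' else '0'))
      = ∑ i ∈ Finset.range n, (if g i then (2 : Int) ^ (n - 1 - i) else 0) := by
  induction n with
  | zero => simp [pvParse2]
  | succ n ih =>
    rw [List.range_succ, List.map_append, pvParse2_append, ih]
    rw [Finset.sum_range_succ]
    have h1 : ∀ i ∈ Finset.range n,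
        (if g i then (2 : Int) ^ (n + 1 - 1 - i) else 0)
          = 2 * (if g i then (2 : Int) ^ (n - 1 - i) else 0) := by
      intro i hi
      simp only [Finset.mem_range] at hi
      split
      · rw [show n + 1 - 1 - i = (n - 1 - i) + 1 by omega]; ring
      · ring
    rw [Finset.sum_congr rfl h1, ← Finset.mul_sum]
    simp only [List.map_cons, List.map_nil, pvParse2, List.foldl, List.length_cons,
      List.length_nil]
    split
    · rw [show n + 1 - 1 - n = 0 from by omega]
      simp
      ring
    · simp
      ring

theorem ind_sum (n : Nat) (t : List Int) (hnd : t.Nodup)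
    (hsub : ∀ x ∈ t, ∃ m : Nat, m < n ∧ x = (m : Int)) :
    ∑ j ∈ Finset.range n, (if (j : Int) ∈ t then (2 : Int) ^ j else 0) = pvMsum t := by
  induction t with
  | nil => simp [pvMsum]
  | cons x t ih =>
    obtain ⟨m, hm, rfl⟩ := hsub _ (List.mem_cons_self)
    have hx : (m : Int) ∉ t := (List.nodup_cons.mp hnd).1
    have hsplit : ∀ j ∈ Finset.range n,
        (if (j : Int) ∈ (m : Int) :: t then (2 : Int) ^ j else 0)
          = (if (j : Int) ∈ t then (2 : Int) ^ j else 0) + (if j = m then (2 : Int) ^ j else 0) := by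
      intro j hj
      by_cases h1 : (j : Int) ∈ t
      · have : j ≠ m := by rintro rfl; exact hx h1
        simp [List.mem_cons, h1, this]
      · by_cases h2 : j = m
        · subst h2; simp [List.mem_cons, h1]
        · have : (j : Int) ≠ (m : Int) := by exact_mod_cast h2
          simp [List.mem_cons, h1, h2, this]
    rw [Finset.sum_congr rfl hsplit, Finset.sum_add_distrib,
      ih (List.nodup_cons.mp hnd).2 (fun x hx' => hsub x (List.mem_cons_of_mem _ hx'))]
    rw [Finset.sum_ite_eq' (Finset.range n) m (fun j => (2 : Int) ^ j)]
    simp [pvMsum, hm, add_comm]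

theorem pvParse2_binlist (n : Nat) (t : List Int) (ht : t.Sublist (pvL n)) :
    pvParse2 ((pvL n).map (fun i : Int => if (n : Int) - 1 - i ∈ t then '1' else '0')) = pvMsum t := by
  have hnd : t.Nodup :=
    ht.nodup (List.Nodup.map (fun a b h => Int.ofNat.inj h) List.nodup_range)
  have hsub : ∀ x ∈ t, ∃ m : Nat, m < n ∧ x = (m : Int) := by
    intro x hx
    have hx' := ht.subset hx
    simp only [pvL, List.mem_map, List.mem_range] at hx'
    obtain ⟨m, hm, rfl⟩ := hx'
    exact ⟨m, hm, rfl⟩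
  rw [pvL, List.map_map]
  have hfun : ((fun i : Int => if (n : Int) - 1 - i ∈ t then '1' else '0') ∘ Int.ofNat)
      = fun j : Nat => if (fun j : Nat => (n : Int) - 1 - (j : Int) ∈ t) j then '1' else '0' := rfl
  rw [hfun, pvParse2_range (fun j : Nat => (n : Int) - 1 - (j : Int) ∈ t) n]
  have hcongr : ∀ i ∈ Finset.range n,
      (if (n : Int) - 1 - (i : Int) ∈ t then (2 : Int) ^ (n - 1 - i) else 0)
        = (fun j : Nat => if (j : Int) ∈ t then (2 : Int) ^ j else 0) (n - 1 - i) := by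
    intro i hi
    simp only [Finset.mem_range] at hi
    have h : ((n - 1 - i : Nat) : Int) = (n : Int) - 1 - i := by omega
    simp only [h]
  rw [Finset.sum_congr rfl hcongr,
    Finset.sum_range_reflect (fun j : Nat => if (j : Int) ∈ t then (2 : Int) ^ j else 0) n]
  exact ind_sum n t hnd hsub

theorem pvMsum_cons (x : Int) (t : List Int) : pvMsum (x :: t) = 2 ^ x.toNat + pvMsum t := by
  simp [pvMsum]

theorem map_msum_cons (x : Int) (T : List (List Int)) :
    (T.map (fun t => x :: t)).map pvMsum = (T.map pvMsum).map (pvAdd (2 ^ x.toNat)) := by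
  simp [List.map_map, Function.comp, pvMsum_cons, pvAdd]

theorem valsums_append_singleton (m : Int) (l : List Int) : ∀ (k : Nat),
    ((pyCombinations (k + 1) (l ++ [m])).map pvMsum).Perm
      ((pyCombinations (k + 1) l).map pvMsum ++
        ((pyCombinations k l).map pvMsum).map (pvAdd (2 ^ m.toNat))) := by
  induction l with
  | nil =>
    intro k
    cases k with
    | zero => simp [pyCombinations, pvMsum, pvAdd]
    | succ k => simp [pyCombinations]
  | cons x xs ih =>
    intro k
    have hL : (pyCombinations (k + 1) ((x :: xs) ++ [m])).map pvMsum
        = ((pyCombinations k (xs ++ [m])).map pvMsum).map (pvAdd (2 ^ x.toNat))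
          ++ (pyCombinations (k + 1) (xs ++ [m])).map pvMsum := by
      simp only [List.cons_append, pyCombinations_cons, List.map_append, map_msum_cons]
    have hR : (pyCombinations (k + 1) (x :: xs)).map pvMsum
        = ((pyCombinations k xs).map pvMsum).map (pvAdd (2 ^ x.toNat))
          ++ (pyCombinations (k + 1) xs).map pvMsum := by
      simp only [pyCombinations_cons, List.map_append, map_msum_cons]
    rw [hL, hR]
    cases k with
    | zero =>
      refine (List.Perm.append (List.Perm.refl _) (ih 0)).trans ?_
      simp [pyCombinations, pvMsum, pvAdd]
    | succ k =>
      have hR2 : (pyCombinations (k + 1) (x :: xs)).map pvMsum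
          = ((pyCombinations k xs).map pvMsum).map (pvAdd (2 ^ x.toNat))
            ++ (pyCombinations (k + 1) xs).map pvMsum := by
        cases k with
        | zero => simp [pyCombinations, pvMsum, pvAdd]
        | succ k => simp only [pyCombinations_cons, List.map_append, map_msum_cons]
      rw [hR2]
      refine (List.Perm.append ((ih k).map _) (ih (k + 1))).trans ?_
      rw [← Multiset.coe_eq_coe]
      have hmid : (pvAdd (2 ^ x.toNat) ∘ pvAdd (2 ^ m.toNat) ∘ pvMsum)
          = (pvAdd (2 ^ m.toNat) ∘ pvAdd (2 ^ x.toNat) ∘ pvMsum) := by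
        funext t; simp only [Function.comp, pvAdd]; ring
      simp only [List.map_append, List.map_map, ← Multiset.coe_add, hmid]
      abel

theorem pvL_succ (n : Nat) : pvL (n + 1) = pvL n ++ [(n : Int)] := by
  simp [pvL, List.range_succ]

theorem pvL_length (n : Nat) : (pvL n).length = n := by simp [pvL]

theorem combos_perm_altStates (n : Nat) : ∀ k : Nat,
    ((pyCombinations k (pvL n)).map pvMsum).Perm (altStates n (k : Int)) := by
  induction n with
  | zero =>
    intro k
    cases k with
    | zero => simp [pyCombinations, pvMsum, altStates, pvL]
    | succ k => simp [pyCombinations, altStates, pvL]; omega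
  | succ n ih =>
    intro k
    cases k with
    | zero => simp [pyCombinations, pvMsum, altStates]
    | succ j =>
      rw [pvL_succ]
      refine (valsums_append_singleton (n : Int) (pvL n) j).trans ?_
      by_cases hj : n < j
      · rw [pyCombinations_nil (by rw [pvL_length]; omega),
          pyCombinations_nil (l := pvL n) (by rw [pvL_length]; omega)]
        have : altStates (n + 1) ((j + 1 : Nat) : Int) = [] := by
          rw [altStates]
          rw [if_neg (by push_cast; omega), if_pos (by push_cast; omega)]
        rw [this]; simp
      · have hcast : ((j + 1 : Nat) : Int) = (j : Int) + 1 := by push_cast; ring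
        have : altStates (n + 1) ((j + 1 : Nat) : Int)
            = altStates n ((j + 1 : Nat) : Int)
              ++ (altStates n ((j : Nat) : Int)).map (fun x => 2 ^ n + x) := by
          rw [altStates, if_neg (by push_cast; omega), if_neg (by push_cast; omega)]
          rw [hcast]; norm_num
        rw [this]
        have hmap : (altStates n ((j : Nat) : Int)).map (fun x => (2 : Int) ^ n + x)
            = (altStates n ((j : Nat) : Int)).map (pvAdd (2 ^ ((n : Int)).toNat)) := by
          simp [pvAdd]
        rw [hmap]
        exact List.Perm.append (ih (j + 1)) ((ih j).map _)

theorem altStates_bounds (n : Nat) : ∀ (k : Int), ∀ x ∈ altStates n k, 0 ≤ x ∧ x < 2 ^ n := by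
  induction n with
  | zero =>
    intro k x hx
    rw [altStates] at hx
    split at hx <;> simp_all
  | succ n ih =>
    intro k x hx
    have hpow : (2 : Int) ^ (n + 1) = 2 ^ n + 2 ^ n := by ring
    have h2 : (0 : Int) < 2 ^ n := by positivity
    rw [altStates] at hx
    split at hx
    · simp_all
    · split at hx
      · simp at hx
      · rw [List.mem_append] at hx
        rcases hx with hx | hx
        · have hb := ih k x hx
          exact ⟨hb.1, by rw [hpow]; linarith [hb.2]⟩
        · rw [List.mem_map] at hx
          obtain ⟨y, hy, rfl⟩ := hx
          have hb := ih (k - 1) y hy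
          exact ⟨by linarith [hb.1], by rw [hpow]; linarith [hb.2]⟩

theorem altStates_pairwise (n : Nat) : ∀ (k : Int), (altStates n k).Pairwise (· < ·) := by
  induction n with
  | zero =>
    intro k
    rw [altStates]
    split <;> simp
  | succ n ih =>
    intro k
    rw [altStates]
    split
    · simp
    · split
      · simp
      · rw [List.pairwise_append]
        refine ⟨ih k, ?_, ?_⟩
        · exact (ih (k - 1)).map _ (fun a b h => by omega)
        · intro a ha b hb
          rw [List.mem_map] at hb
          obtain ⟨y, hy, rfl⟩ := hb
          have h1 := (altStates_bounds n k a ha).2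
          have h2 := (altStates_bounds n (k - 1) y hy).1
          omega

-- ===== VERDICT (by name: the statement is the Claim_ definition above) =====
theorem pvParse2_empty : pvParse2 ("".toList) = 0 := rfl

theorem offset_eq (anc : String) (N : Nat) :
    (if anc = "" then (0 : Int) else pvParse2 anc.toList * 2 ^ N)
      = pvParse2 anc.toList * 2 ^ N := by
  split
  · subst ‹anc = ""›; rw [pvParse2_empty]; ring
  · rfl

theorem pyRange_eq_pvL (n_orb : Int) :
    PySem.List.pyRange 0 n_orb 1 = pvL (max n_orb 0).toNat := by
  rw [PySem.List.pyRange_one]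
  unfold pvL
  have h : (n_orb - 0).toNat = (max n_orb 0).toNat := by omega
  rw [h]
  exact List.map_congr_left (fun k _ => by simp)

theorem get_number_state_indices_spec : Claim_equal_get_number_state_indices := by
  intro n_orb n_elec anc _hdom hpre
  unfold Spec_get_number_state_indices
  obtain ⟨hk0, hanc⟩ := hpre
  unfold get_number_state_indices get_number_state_indices_alt
  rw [pyRange_eq_pvL]
  set N : Nat := (max n_orb 0).toNat with hN
  have hkc : ((n_elec.toNat : Nat) : Int) = n_elec := by omega
  rw [offset_eq]
  set off : Int := pvParse2 anc.toList * 2 ^ N with hoff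
  -- each combination value is off + pvMsum tup
  have hval : ∀ tup ∈ pyCombinations n_elec.toNat (pvL N),
      pvParse2 (anc.toList ++ (pvL N).map (fun i => if n_orb - 1 - i ∈ tup then '1' else '0'))
        = off + pvMsum tup := by
    intro tup htup
    have hsub := pyCombinations_sublist htup
    rw [pvParse2_append, List.length_map, pvL_length]
    by_cases hpos : 0 < n_orb
    · have hNn : ((N : Nat) : Int) = n_orb := by omega
      have : ((pvL N).map (fun i => if n_orb - 1 - i ∈ tup then '1' else '0'))
          = ((pvL N).map (fun i : Int => if (N : Int) - 1 - i ∈ tup then '1' else '0')) := by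
        rw [hNn]
      rw [this, pvParse2_binlist N tup hsub]
    · have hN0 : N = 0 := by omega
      rw [hN0] at hsub ⊢
      have : tup = [] := List.sublist_nil.mp (by simpa [pvL] using hsub)
      subst this
      simp [pvMsum, pvParse2, pvL, hoff, hN0]
  rw [List.map_congr_left hval]
  have hmap : (pyCombinations n_elec.toNat (pvL N)).map (fun tup => off + pvMsum tup)
      = ((pyCombinations n_elec.toNat (pvL N)).map pvMsum).map (fun v => off + v) := by
    rw [List.map_map]; rfl
  rw [hmap]
  -- the B-side list
  have hperm : ((altStates N n_elec).map (fun x => off + x)).Perm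
      (((pyCombinations n_elec.toNat (pvL N)).map pvMsum).map (fun v => off + v)) := by
    refine (List.Perm.map _ ?_).symm
    have := combos_perm_altStates N n_elec.toNat
    rwa [hkc] at this
  have hpair : ((altStates N n_elec).map (fun x => off + x)).Pairwise (· < ·) :=
    (altStates_pairwise N n_elec).map _ (fun a b h => by omega)
  have hsorted := PySem.List.sorted_eq_of_perm_of_pairwise_lt _ _ (fun x : Int => x) hperm hpair
  simp only [hsorted]
  by_cases hnil : altStates N n_elec = []
  · simp [hnil]
  · simp [hnil]
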